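-- pv_equiv track=rewrite | github.com/Shane360129/DBTraining | traindata_clean__fix_sum_distinct_to_subquery.py | rebuild_query_toks_no_value
-- ===== SOURCE A (Python) =====
-- def rebuild_query_toks(query):
--     """Rebuild query_toks from query string."""
--     tokens = []
--     i = 0
--     s = query.strip()
--     while i < len(s):
--         if s[i].isspace():
--             i += 1
--             continue
--         # N'...' pattern
--         if s[i] == 'N' and i + 1 < len(s) and s[i+1] == "'":
--             tokens.append('N')
--             j = i + 2
--             while j < len(s) and s[j] != "'":
--                 j += 1
--             tokens.append(s[i+1:j+1])
--             i = j + 1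
--             continue
--         # String literal
--         if s[i] == "'":
--             j = i + 1
--             while j < len(s) and s[j] != "'":
--                 j += 1
--             tokens.append(s[i:j+1])
--             i = j + 1
--             continue
--         # Single-char punctuation
--         if s[i] in '(),;*':
--             tokens.append(s[i])
--             i += 1
--             continue
--         # Two-char operators
--         if i + 1 < len(s) and s[i:i+2] in ('<=', '>=', '<>'):
--             tokens.append(s[i:i+2])
--             i += 2
--             continue
--         if s[i] in '=<>':
--             tokens.append(s[i])
--             i += 1
--             continue
--         # Word/identifier (including dots for WP_M09.dbo.xxx)
--         j = i
--         while j < len(s) and not s[j].isspace() and s[j] not in "(),;=<>'*":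
--             j += 1
--         if j > i:
--             tokens.append(s[i:j])
--         i = j
--     return tokens
--
-- def rebuild_query_toks_no_value(query):
--     """Rebuild query_toks_no_value - replace literal values with 'value'."""
--     tokens = rebuild_query_toks(query)
--     result = []
--     for t in tokens:
--         if t.startswith("'") and t.endswith("'"):
--             result.append("'value'")
--         elif t == 'N':
--             # Keep N prefix, next token will be the string
--             result.append(t)
--         else:
--             # Try to detect numeric literals after = or comparison
--             result.append(t)
--     return result
-- ===== SOURCE B (Python) =====
-- # Single left-to-right character state machine (one fold) instead of A's
-- # index-advancing scanner with nested while-loops and an N'-literal special case.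
-- def rebuild_query_toks_no_value(query):
--     toks = []
--     word = []        # current word / string-literal buffer
--     instr = False    # inside a string literal
--     pend = None      # pending '<' or '>' awaiting a possible two-char operator
--     for c in query.strip():
--         if instr:
--             word.append(c)
--             if c == "'":
--                 toks.append(''.join(word))
--                 word = []
--                 instr = False
--             continue
--         if pend is not None and ((pend == '<' and c in '=>') or (pend == '>' and c == '=')):
--             toks.append(pend + c)
--             pend = None
--             continue
--         if pend is not None:
--             toks.append(pend)
--             pend = None
--         if c.isspace():
--             if word:
--                 toks.append(''.join(word))
--                 word = []
--         elif c == "'":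
--             if word:
--                 toks.append(''.join(word))
--             word = [c]
--             instr = True
--         elif c in '(),;*=':
--             if word:
--                 toks.append(''.join(word))
--                 word = []
--             toks.append(c)
--         elif c in '<>':
--             if word:
--                 toks.append(''.join(word))
--                 word = []
--             pend = c
--         else:
--             word.append(c)
--     if pend is not None:
--         toks.append(pend)
--     if word:
--         toks.append(''.join(word))
--     return ["'value'" if t.startswith("'") and t.endswith("'") else t for t in toks]
-- ===== Notes on version B (the rewrite author's own statement) =====
-- stated objective: alternative
-- what changed: Replaces A's index-advancing scanner with nested while-loops and an N'-literal special case by a single left-to-right fold of a character state machine (in-string / pending-operator / word-buffer states); the redundant N' special case disappears because flushing the word buffer at a quote yields the same tokens.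
import Mathlib
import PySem

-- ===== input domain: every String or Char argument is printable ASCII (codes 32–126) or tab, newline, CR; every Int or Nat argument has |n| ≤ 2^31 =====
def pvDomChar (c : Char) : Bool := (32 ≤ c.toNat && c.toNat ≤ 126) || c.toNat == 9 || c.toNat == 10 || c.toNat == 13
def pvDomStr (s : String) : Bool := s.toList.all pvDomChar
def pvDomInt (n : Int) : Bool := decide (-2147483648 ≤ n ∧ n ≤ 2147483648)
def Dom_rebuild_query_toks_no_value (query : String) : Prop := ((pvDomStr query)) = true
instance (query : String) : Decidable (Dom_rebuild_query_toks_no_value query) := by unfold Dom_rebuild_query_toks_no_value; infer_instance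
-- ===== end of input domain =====

-- B replaces A's index-advancing scanner (nested while loops + an N'-literal special case)
-- by a single fold of a character state machine; same return value, similar cost.

-- ===== PORT A =====

-- Python slice s[a:b] for 0 ≤ a ≤ b (the only uses below)
def pvSlice (cs : List Char) (a b : Nat) : List Char := (cs.drop a).take (b - a)

def punctA : List Char := ['(', ')', ',', ';', '*']          -- "(),;*"
def cmpA : List Char := ['=', '<', '>']                       -- "=<>"
def stopA : List Char := ['(', ')', ',', ';', '=', '<', '>', '\'', '*']   -- "(),;=<>'*"

-- inner while of the string-literal scans: first index ≥ j holding a quote (or length)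
def scanQuoteA (s : List Char) (j : Nat) : Nat :=
  if h : j < s.length then
    if s[j] = '\'' then j else scanQuoteA s (j + 1)
  else j
termination_by s.length - j

-- inner while of the word scan
def scanWordA (s : List Char) (j : Nat) : Nat :=
  if h : j < s.length then
    if ¬ PySem.Chars.isspace s[j] ∧ ¬ stopA.contains s[j] then scanWordA s (j + 1) else j
  else j
termination_by s.length - j

theorem scanQuoteA_ge (s : List Char) (j : Nat) : j ≤ scanQuoteA s j := by
  unfold scanQuoteA
  split
  · split
    · exact Nat.le_refl j
    · exact Nat.le_trans (Nat.le_succ j) (scanQuoteA_ge s (j + 1))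
  · exact Nat.le_refl j
termination_by s.length - j

theorem scanWordA_ge (s : List Char) (j : Nat) : j ≤ scanWordA s j := by
  unfold scanWordA
  split
  · split
    · exact Nat.le_trans (Nat.le_succ j) (scanWordA_ge s (j + 1))
    · exact Nat.le_refl j
  · exact Nat.le_refl j
termination_by s.length - j

theorem scanWordA_gt (s : List Char) (j : Nat) (h : j < s.length)
    (h1 : ¬ PySem.Chars.isspace s[j]) (h2 : ¬ stopA.contains s[j]) : j < scanWordA s j := by
  rw [scanWordA, dif_pos h, if_pos ⟨h1, h2⟩]
  exact Nat.lt_of_lt_of_le (Nat.lt_succ_self j) (scanWordA_ge s (j + 1))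

def tokA (s : List Char) (i : Nat) : List String :=
  if h : i < s.length then
    if hsp : PySem.Chars.isspace s[i] then tokA s (i + 1)
    else if s[i] = 'N' ∧ s[i + 1]? = some '\'' then
      let j := scanQuoteA s (i + 2)
      "N" :: String.ofList (pvSlice s (i + 1) (j + 1)) :: tokA s (j + 1)
    else if hq : s[i] = '\'' then
      let j := scanQuoteA s (i + 1)
      String.ofList (pvSlice s i (j + 1)) :: tokA s (j + 1)
    else if hp : punctA.contains s[i] then
      String.ofList [s[i]] :: tokA s (i + 1)
    else if i + 1 < s.length ∧ (pvSlice s i (i + 2) = ['<', '='] ∨ pvSlice s i (i + 2) = ['>', '='] ∨ pvSlice s i (i + 2) = ['<', '>']) then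
      String.ofList (pvSlice s i (i + 2)) :: tokA s (i + 2)
    else if hc : cmpA.contains s[i] then
      String.ofList [s[i]] :: tokA s (i + 1)
    else
      let j := scanWordA s i
      if i < j then String.ofList (pvSlice s i j) :: tokA s j else tokA s j
  else []
termination_by s.length - i
decreasing_by
  · omega
  · have := scanQuoteA_ge s (i + 2); omega
  · have := scanQuoteA_ge s (i + 1); omega
  · omega
  · omega
  · omega
  · have hst : ¬ stopA.contains s[i] := by
      simp only [stopA, punctA, cmpA, List.contains_eq_mem, List.mem_cons, List.not_mem_nil,
        decide_eq_true_eq] at hp hc ⊢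
      tauto
    have := scanWordA_gt s i h hsp hst; omega
  · have hst : ¬ stopA.contains s[i] := by
      simp only [stopA, punctA, cmpA, List.contains_eq_mem, List.mem_cons, List.not_mem_nil,
        decide_eq_true_eq] at hp hc ⊢
      tauto
    have := scanWordA_gt s i h hsp hst; omega

def maskA (t : String) : String :=
  if PySem.Str.startswith t "'" && PySem.Str.endswith t "'" then "'value'"
  else if t = "N" then t
  else t

def rebuild_query_toks_no_value (query : String) : List String :=
  (tokA (PySem.Chars.strip query.toList) 0).map maskA

-- ===== PORT B =====

-- state: (tokens so far, current word/literal buffer, inside-string flag, pending '<' or '>')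
def punctB : List Char := ['(', ')', ',', ';', '*', '=']      -- "(),;*="

def flushB (toks : List String) (word : List Char) : List String :=
  if word = [] then toks else toks ++ [String.ofList word]

def pairB : Option Char → Char → Bool
  | some p, c => (p == '<' && (c == '=' || c == '>')) || (p == '>' && c == '=')
  | none, _ => false

def stepB (st : List String × List Char × Bool × Option Char) (c : Char) :
    List String × List Char × Bool × Option Char :=
  match st with
  | (toks, word, instr, pend) =>
    if instr then
      let w := word ++ [c]
      if c = '\'' then (toks ++ [String.ofList w], [], false, none) else (toks, w, true, none)
    else if pairB pend c then
      (toks ++ [String.ofList [pend.getD ' ', c]], [], false, none)   -- pend + c (pend is some _ here)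
    else
      let toks1 := match pend with | some p => toks ++ [String.ofList [p]] | none => toks
      if PySem.Chars.isspace c then (flushB toks1 word, [], false, none)
      else if c = '\'' then (flushB toks1 word, [c], true, none)
      else if punctB.contains c then (flushB toks1 word ++ [String.ofList [c]], [], false, none)
      else if c = '<' ∨ c = '>' then (flushB toks1 word, [], false, some c)
      else (toks1, word ++ [c], false, none)

def finishB (st : List String × List Char × Bool × Option Char) : List String :=
  match st with
  | (toks, word, _, pend) =>
    let toks1 := match pend with | some p => toks ++ [String.ofList [p]] | none => toks
    flushB toks1 word

def maskB (t : String) : String :=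
  if PySem.Str.startswith t "'" && PySem.Str.endswith t "'" then "'value'" else t

def rebuild_query_toks_no_value_alt (query : String) : List String :=
  (finishB ((PySem.Chars.strip query.toList).foldl stepB ([], [], false, none))).map maskB

-- ===== PRECONDITION & SPEC =====
def Spec_rebuild_query_toks_no_value (query : String) (out : List String) : Prop := out = rebuild_query_toks_no_value_alt query
instance (query : String) (out : List String) : Decidable (Spec_rebuild_query_toks_no_value query out) := by unfold Spec_rebuild_query_toks_no_value; infer_instance

-- ===== CLAIM (what is proved, stated in full; the proofs are below) =====
def Claim_equal_rebuild_query_toks_no_value : Prop := ∀ (query : String), Dom_rebuild_query_toks_no_value query → Spec_rebuild_query_toks_no_value query (rebuild_query_toks_no_value query)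

-- ===== LEMMAS AND PROOFS =====

theorem mask_eq (t : String) : maskA t = maskB t := by
  unfold maskA maskB; split_ifs <;> rfl

theorem pvSlice_self (cs : List Char) (i : Nat) : pvSlice cs i i = [] := by
  simp [pvSlice]

theorem pvSlice_cons (cs : List Char) {i j : Nat} (h1 : i < j) (h2 : i < cs.length) :
    pvSlice cs i j = cs[i] :: pvSlice cs (i + 1) j := by
  unfold pvSlice
  rw [List.drop_eq_getElem_cons h2]
  have : j - i = (j - (i + 1)) + 1 := by omega
  rw [this, List.take_succ_cons]

theorem pvSlice_of_length_le (cs : List Char) {i j : Nat} (h : cs.length ≤ j) :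
    pvSlice cs i j = cs.drop i := by
  unfold pvSlice
  apply List.take_of_length_le
  simp; omega

theorem finishB_neutral (toks : List String) : finishB (toks, [], false, none) = toks := by
  simp [finishB, flushB]

theorem mem_stopA (c : Char) : stopA.contains c = true ↔
    (c = '(' ∨ c = ')' ∨ c = ',' ∨ c = ';' ∨ c = '=' ∨ c = '<' ∨ c = '>' ∨ c = '\'' ∨ c = '*') := by
  simp [stopA]

theorem mem_punctA (c : Char) : punctA.contains c = true ↔
    (c = '(' ∨ c = ')' ∨ c = ',' ∨ c = ';' ∨ c = '*') := by
  simp [punctA]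

theorem mem_cmpA (c : Char) : cmpA.contains c = true ↔ (c = '=' ∨ c = '<' ∨ c = '>') := by
  simp [cmpA]

theorem mem_punctB (c : Char) : punctB.contains c = true ↔
    (c = '(' ∨ c = ')' ∨ c = ',' ∨ c = ';' ∨ c = '*' ∨ c = '=') := by
  simp [punctB]

theorem step_flush (toks : List String) (w : List Char) (c : Char) (hw : w ≠ [])
    (hc : PySem.Chars.isspace c ∨ c = '\'' ∨ punctB.contains c ∨ c = '<' ∨ c = '>') :
    stepB (toks, w, false, none) c = stepB (toks ++ [String.ofList w], [], false, none) c := by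
  simp only [stepB, pairB, Bool.false_eq_true, if_false, flushB, hw]
  split_ifs <;> simp_all

theorem step_pend_nomatch (toks : List String) (p c : Char) (h : pairB (some p) c = false) :
    stepB (toks, [], false, some p) c = stepB (toks ++ [String.ofList [p]], [], false, none) c := by
  simp only [pairB] at h
  simp only [stepB, pairB, h, Bool.false_eq_true, if_false]

theorem step_instr_quote (toks : List String) (w : List Char) :
    stepB (toks, w, true, none) '\'' = (toks ++ [String.ofList (w ++ ['\''])], [], false, none) := by
  simp [stepB]

theorem step_instr_other (toks : List String) (w : List Char) (c : Char) (hc : c ≠ '\'') :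
    stepB (toks, w, true, none) c = (toks, w ++ [c], true, none) := by
  simp [stepB, hc]

theorem step_word (toks : List String) (w : List Char) (c : Char)
    (h1 : ¬ PySem.Chars.isspace c) (h2 : ¬ stopA.contains c) :
    stepB (toks, w, false, none) c = (toks, w ++ [c], false, none) := by
  rw [mem_stopA] at h2
  push Not at h2
  obtain ⟨n1, n2, n3, n4, n5, n6, n7, n8, n9⟩ := h2
  have hp : c ∉ punctB := by simp [punctB]; tauto
  simp [stepB, pairB, h1, hp, n6, n7, n8]

theorem L_str (cs : List Char) (i : Nat) (toks : List String) (w : List Char) (hw : w ≠ []) :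
    finishB ((cs.drop i).foldl stepB (toks, w, true, none)) =
      if scanQuoteA cs i < cs.length then
        finishB ((cs.drop (scanQuoteA cs i + 1)).foldl stepB
          (toks ++ [String.ofList (w ++ pvSlice cs i (scanQuoteA cs i + 1))], [], false, none))
      else toks ++ [String.ofList (w ++ cs.drop i)] := by
  by_cases h : i < cs.length
  · rw [List.drop_eq_getElem_cons h, List.foldl_cons]
    by_cases hq : cs[i] = '\''
    · have hscan : scanQuoteA cs i = i := by rw [scanQuoteA, dif_pos h, if_pos hq]
      rw [hq, step_instr_quote, hscan, if_pos h]
      have hsl : pvSlice cs i (i + 1) = [cs[i]] := by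
        rw [pvSlice_cons cs (by omega) h, pvSlice_self]
      rw [hsl, hq]
    · have hscan : scanQuoteA cs i = scanQuoteA cs (i + 1) := by
        rw [scanQuoteA, dif_pos h, if_neg hq]
      have hge : i + 1 ≤ scanQuoteA cs (i + 1) := scanQuoteA_ge cs (i + 1)
      rw [step_instr_other _ _ _ hq, L_str cs (i + 1) toks (w ++ [cs[i]]) (by simp), hscan]
      by_cases hlt : scanQuoteA cs (i + 1) < cs.length
      · rw [if_pos hlt, if_pos hlt]
        have : pvSlice cs i (scanQuoteA cs (i + 1) + 1) =
            cs[i] :: pvSlice cs (i + 1) (scanQuoteA cs (i + 1) + 1) :=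
          pvSlice_cons cs (by omega) h
        rw [this]; simp
      · rw [if_neg hlt, if_neg hlt]; simp
  · have hd : cs.drop i = [] := List.drop_eq_nil_of_le (by omega)
    have hscan : scanQuoteA cs i = i := by rw [scanQuoteA, dif_neg h]
    rw [hd, hscan, if_neg h]
    simp [finishB, flushB, hw]
termination_by cs.length - i
decreasing_by omega

theorem L_word (cs : List Char) (i : Nat) (toks : List String) (w : List Char) (hw : w ≠ []) :
    finishB ((cs.drop i).foldl stepB (toks, w, false, none)) =
      finishB ((cs.drop (scanWordA cs i)).foldl stepB
        (toks ++ [String.ofList (w ++ pvSlice cs i (scanWordA cs i))], [], false, none)) := by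
  by_cases h : i < cs.length
  · by_cases hwc : ¬ PySem.Chars.isspace cs[i] ∧ ¬ stopA.contains cs[i]
    · have hscan : scanWordA cs i = scanWordA cs (i + 1) := by
        rw [scanWordA, dif_pos h, if_pos hwc]
      have hgt : i < scanWordA cs i := scanWordA_gt cs i h hwc.1 hwc.2
      rw [List.drop_eq_getElem_cons h, List.foldl_cons, step_word _ _ _ hwc.1 hwc.2,
        L_word cs (i + 1) toks (w ++ [cs[i]]) (by simp), hscan]
      have : pvSlice cs i (scanWordA cs (i + 1)) =
          cs[i] :: pvSlice cs (i + 1) (scanWordA cs (i + 1)) :=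
        pvSlice_cons cs (by omega) h
      rw [this]; simp
    · have hscan : scanWordA cs i = i := by rw [scanWordA, dif_pos h, if_neg hwc]
      rw [hscan, pvSlice_self, List.append_nil, List.drop_eq_getElem_cons h,
        List.foldl_cons, List.foldl_cons]
      rw [step_flush toks w cs[i] hw ?hdelim]
      case hdelim =>
        rcases Decidable.not_and_iff_not_or_not.mp hwc with h1 | h2
        · left; exact not_not.mp h1
        · have h2' : stopA.contains cs[i] = true := not_not.mp h2
          rw [mem_stopA] at h2'
          rw [mem_punctB]
          tauto
  · have hd : cs.drop i = [] := List.drop_eq_nil_of_le (by omega)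
    have hscan : scanWordA cs i = i := by rw [scanWordA, dif_neg h]
    rw [hscan, hd, pvSlice_self, List.append_nil]
    simp [finishB, flushB, hw]
termination_by cs.length - i
decreasing_by omega

theorem scanQuoteA_le (s : List Char) (j : Nat) (h : j ≤ s.length) : scanQuoteA s j ≤ s.length := by
  unfold scanQuoteA
  split
  · split
    · omega
    · exact scanQuoteA_le s (j + 1) (by omega)
  · omega
termination_by s.length - j

theorem main_lemma (cs : List Char) (i : Nat) (toks : List String) :
    finishB (((cs.drop i)).foldl stepB (toks, [], false, none)) = toks ++ tokA cs i := by
  have hsq : PySem.Chars.isspace '\'' = false := by decide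
  by_cases h : i < cs.length
  · rw [List.drop_eq_getElem_cons h, List.foldl_cons]
    by_cases hsp : PySem.Chars.isspace cs[i]
    · -- whitespace
      have hA : tokA cs i = tokA cs (i + 1) := by
        rw [tokA]; simp only [dif_pos h, dif_pos hsp]
      have hstep : stepB (toks, [], false, none) cs[i] = (toks, [], false, none) := by
        simp [stepB, pairB, flushB, hsp]
      rw [hstep, main_lemma cs (i + 1) toks, hA]
    · by_cases hN : cs[i] = 'N' ∧ cs[i + 1]? = some '\''
      · -- N'...' pattern
        obtain ⟨hN1, hN2⟩ := hN
        obtain ⟨h1lt, h1q⟩ := List.getElem?_eq_some_iff.mp hN2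
        have hA : tokA cs i = "N" :: String.ofList (pvSlice cs (i + 1) (scanQuoteA cs (i + 2) + 1))
            :: tokA cs (scanQuoteA cs (i + 2) + 1) := by
          rw [tokA]
          simp only [dif_pos h, dif_neg hsp, if_pos (⟨hN1, hN2⟩ :
            cs[i] = 'N' ∧ cs[i + 1]? = some '\'')]
        have hstN : ¬ stopA.contains cs[i] := by rw [hN1]; decide
        have hstep1 : stepB (toks, [], false, none) cs[i] = (toks, [cs[i]], false, none) := by
          simpa using step_word toks [] cs[i] hsp hstN
        have hstep2 : stepB (toks, [cs[i]], false, none) cs[i + 1] =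
            (toks ++ [String.ofList [cs[i]]], ['\''], true, none) := by
          rw [h1q]; simp [stepB, pairB, flushB, hsq]
        have hNstr : String.ofList [cs[i]] = "N" := by rw [hN1]
        rw [hstep1, List.drop_eq_getElem_cons h1lt, List.foldl_cons, hstep2,
          L_str cs (i + 2) _ ['\''] (by simp), hA]
        have hjge : i + 2 ≤ scanQuoteA cs (i + 2) := scanQuoteA_ge cs (i + 2)
        by_cases hjl : scanQuoteA cs (i + 2) < cs.length
        · rw [if_pos hjl, main_lemma cs (scanQuoteA cs (i + 2) + 1) _]
          have hsl : pvSlice cs (i + 1) (scanQuoteA cs (i + 2) + 1) =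
              cs[i + 1] :: pvSlice cs (i + 2) (scanQuoteA cs (i + 2) + 1) :=
            pvSlice_cons cs (by omega) h1lt
          rw [hsl, h1q, hNstr]; simp
        · rw [if_neg hjl]
          have hjlen : scanQuoteA cs (i + 2) = cs.length :=
            le_antisymm (scanQuoteA_le cs (i + 2) (by omega)) (by omega)
          have htok : tokA cs (scanQuoteA cs (i + 2) + 1) = [] := by
            rw [tokA]; simp only [dif_neg (by omega : ¬ scanQuoteA cs (i + 2) + 1 < cs.length)]
          have hsl : pvSlice cs (i + 1) (scanQuoteA cs (i + 2) + 1) = cs.drop (i + 1) :=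
            pvSlice_of_length_le cs (by omega)
          rw [htok, hsl, List.drop_eq_getElem_cons h1lt, h1q, hNstr]; simp
      · by_cases hq : cs[i] = '\''
        · -- string literal
          have hA : tokA cs i = String.ofList (pvSlice cs i (scanQuoteA cs (i + 1) + 1))
              :: tokA cs (scanQuoteA cs (i + 1) + 1) := by
            rw [tokA]
            simp only [dif_pos h, dif_neg hsp, if_neg hN, dif_pos hq]
          have hstep : stepB (toks, [], false, none) cs[i] = (toks, [cs[i]], true, none) := by
            simp [stepB, pairB, flushB, hq, hsq]
          rw [hstep, L_str cs (i + 1) _ [cs[i]] (by simp), hA]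
          have hjge : i + 1 ≤ scanQuoteA cs (i + 1) := scanQuoteA_ge cs (i + 1)
          by_cases hjl : scanQuoteA cs (i + 1) < cs.length
          · rw [if_pos hjl, main_lemma cs (scanQuoteA cs (i + 1) + 1) _]
            have hsl : pvSlice cs i (scanQuoteA cs (i + 1) + 1) =
                cs[i] :: pvSlice cs (i + 1) (scanQuoteA cs (i + 1) + 1) :=
              pvSlice_cons cs (by omega) h
            rw [hsl]; simp
          · rw [if_neg hjl]
            have hjlen : scanQuoteA cs (i + 1) = cs.length :=
              le_antisymm (scanQuoteA_le cs (i + 1) (by omega)) (by omega)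
            have htok : tokA cs (scanQuoteA cs (i + 1) + 1) = [] := by
              rw [tokA]; simp only [dif_neg (by omega : ¬ scanQuoteA cs (i + 1) + 1 < cs.length)]
            have hsl : pvSlice cs i (scanQuoteA cs (i + 1) + 1) = cs.drop i :=
              pvSlice_of_length_le cs (by omega)
            rw [htok, hsl, List.drop_eq_getElem_cons h]; simp
        · by_cases hp : punctA.contains cs[i]
          · -- single-char punctuation
            have hA : tokA cs i = String.ofList [cs[i]] :: tokA cs (i + 1) := by
              rw [tokA]
              simp only [dif_pos h, dif_neg hsp, if_neg hN, dif_neg hq, dif_pos hp]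
            have hpB : cs[i] ∈ punctB := by
              rw [mem_punctA] at hp; simp [punctB]; tauto
            have hstep : stepB (toks, [], false, none) cs[i] =
                (toks ++ [String.ofList [cs[i]]], [], false, none) := by
              simp [stepB, pairB, flushB, hsp, hq, hpB]
            rw [hstep, main_lemma cs (i + 1) _, hA]
            simp
          · by_cases h2 : i + 1 < cs.length ∧ (pvSlice cs i (i + 2) = ['<', '='] ∨
                pvSlice cs i (i + 2) = ['>', '='] ∨ pvSlice cs i (i + 2) = ['<', '>'])
            · -- two-char operator
              have hA : tokA cs i = String.ofList (pvSlice cs i (i + 2)) :: tokA cs (i + 2) := by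
                rw [tokA]
                simp only [dif_pos h, dif_neg hsp, if_neg hN, dif_neg hq, dif_neg hp, if_pos h2]
              obtain ⟨h1lt, hP⟩ := h2
              have hsl2 : pvSlice cs i (i + 2) = [cs[i], cs[i + 1]] := by
                rw [pvSlice_cons cs (by omega) h, pvSlice_cons cs (by omega) h1lt, pvSlice_self]
              rw [hsl2] at hP
              have hcc : (cs[i] = '<' ∧ (cs[i + 1] = '=' ∨ cs[i + 1] = '>')) ∨
                  (cs[i] = '>' ∧ cs[i + 1] = '=') := by
                rcases hP with h' | h' | h' <;> simp_all
              have hlt' : cs[i] = '<' ∨ cs[i] = '>' := by tauto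
              have hpB : cs[i] ∉ punctB := by
                rcases hlt' with h' | h' <;> rw [h'] <;> decide
              have hstep1 : stepB (toks, [], false, none) cs[i] = (toks, [], false, some cs[i]) := by
                simp [stepB, pairB, flushB, hsp, hq, hpB, hlt']
              have hpair : pairB (some cs[i]) cs[i + 1] = true := by
                rcases hcc with ⟨ha, hb | hb⟩ | ⟨ha, hb⟩ <;> rw [ha, hb] <;> decide
              have hstep2 : stepB (toks, [], false, some cs[i]) cs[i + 1] =
                  (toks ++ [String.ofList [cs[i], cs[i + 1]]], [], false, none) := by
                simp [stepB, hpair]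
              rw [hstep1, List.drop_eq_getElem_cons h1lt, List.foldl_cons, hstep2,
                main_lemma cs (i + 2) _, hA, hsl2]
              simp
            · by_cases hc : cmpA.contains cs[i]
              · have hA : tokA cs i = String.ofList [cs[i]] :: tokA cs (i + 1) := by
                  rw [tokA]
                  simp only [dif_pos h, dif_neg hsp, if_neg hN, dif_neg hq, dif_neg hp,
                    if_neg h2, dif_pos hc]
                have hc' := hc
                rw [mem_cmpA] at hc'
                by_cases heq : cs[i] = '='
                · -- single '='
                  have hpB : cs[i] ∈ punctB := by rw [heq]; decide
                  have hstep : stepB (toks, [], false, none) cs[i] =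
                      (toks ++ [String.ofList [cs[i]]], [], false, none) := by
                    simp [stepB, pairB, flushB, hsp, hq, hpB]
                  rw [hstep, main_lemma cs (i + 1) _, hA]
                  simp
                · -- single '<' or '>' (no matching second char)
                  have hlt' : cs[i] = '<' ∨ cs[i] = '>' := by tauto
                  have hpB : cs[i] ∉ punctB := by
                    rcases hlt' with h' | h' <;> rw [h'] <;> decide
                  have hstep1 : stepB (toks, [], false, none) cs[i] =
                      (toks, [], false, some cs[i]) := by
                    simp [stepB, pairB, flushB, hsp, hq, hpB, hlt']
                  rw [hstep1, hA]
                  by_cases h1lt : i + 1 < cs.length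
                  · have hsl2 : pvSlice cs i (i + 2) = [cs[i], cs[i + 1]] := by
                      rw [pvSlice_cons cs (by omega) h, pvSlice_cons cs (by omega) h1lt,
                        pvSlice_self]
                    have hpair : pairB (some cs[i]) cs[i + 1] = false := by
                      rcases Decidable.not_and_iff_not_or_not.mp h2 with hbad | hnd
                      · omega
                      · rw [hsl2] at hnd
                        simp only [pairB]
                        rcases hlt' with h' | h' <;> rw [h'] <;> rw [h'] at hnd <;>
                          simp_all
                    rw [List.drop_eq_getElem_cons h1lt, List.foldl_cons,
                      step_pend_nomatch toks cs[i] cs[i + 1] hpair, ← List.foldl_cons,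
                      ← List.drop_eq_getElem_cons h1lt, main_lemma cs (i + 1) _]
                    simp
                  · have hd : cs.drop (i + 1) = [] := List.drop_eq_nil_of_le (by omega)
                    have htok : tokA cs (i + 1) = [] := by
                      rw [tokA]; simp only [dif_neg (by omega : ¬ i + 1 < cs.length)]
                    rw [hd, htok]
                    simp [finishB, flushB]
              · -- word / identifier
                have hst : ¬ stopA.contains cs[i] := by
                  rw [mem_stopA]
                  rw [mem_punctA] at hp; rw [mem_cmpA] at hc
                  tauto
                have hgt : i < scanWordA cs i := scanWordA_gt cs i h hsp hst
                have hA : tokA cs i = String.ofList (pvSlice cs i (scanWordA cs i))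
                    :: tokA cs (scanWordA cs i) := by
                  rw [tokA]
                  simp only [dif_pos h, dif_neg hsp, if_neg hN, dif_neg hq, dif_neg hp,
                    if_neg h2, dif_neg hc]
                  simp [hgt]
                have hstep : stepB (toks, [], false, none) cs[i] = (toks, [cs[i]], false, none) := by
                  simpa using step_word toks [] cs[i] hsp hst
                have hscan : scanWordA cs i = scanWordA cs (i + 1) := by
                  rw [scanWordA, dif_pos h, if_pos ⟨hsp, hst⟩]
                rw [hstep, L_word cs (i + 1) toks [cs[i]] (by simp), ← hscan,
                  main_lemma cs (scanWordA cs i) _, hA]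
                have hsl : pvSlice cs i (scanWordA cs i) =
                    cs[i] :: pvSlice cs (i + 1) (scanWordA cs i) := pvSlice_cons cs hgt h
                rw [hsl]
                simp
  · have hd : cs.drop i = [] := List.drop_eq_nil_of_le (by omega)
    have hA : tokA cs i = [] := by rw [tokA]; simp only [dif_neg h]
    rw [hd, hA]
    simp [finishB_neutral]
termination_by cs.length - i
decreasing_by all_goals omega

-- ===== VERDICT (by name: the statement is the Claim_ definition above) =====
theorem rebuild_query_toks_no_value_spec : Claim_equal_rebuild_query_toks_no_value := by
  intro query _
  unfold Spec_rebuild_query_toks_no_value rebuild_query_toks_no_value rebuild_query_toks_no_value_alt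
  have h := main_lemma (PySem.Chars.strip query.toList) 0 []
  simp only [List.drop_zero] at h
  rw [h]
  simp [mask_eq]
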